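-- pv_equiv track=rewrite | github.com/Wilaroo/Trading-and-Analysis-Platform | backend/services/stock_data.py | _is_valid_symbol
-- ===== SOURCE A (Python) =====
-- def _is_valid_symbol(symbol: str) -> bool:
--     """Check if a symbol is valid and tradeable"""
--     if not symbol or len(symbol) > 10:
--         return False
--
--     # Skip symbols with spaces (usually warrants or units like "IRS WS")
--     if ' ' in symbol:
--         return False
--
--     # Skip indices (VIX, etc.) - they're not directly tradeable
--     indices = {'VIX', 'DJI', 'IXIC', 'GSPC', 'RUT', 'NDX', 'SPX'}
--     if symbol in indices:
--         return False
--
--     # Skip preferred stocks with specific suffixes that cause issues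
--     problematic_suffixes = ['PRB', 'PRA', 'PRC', 'PRD', 'PRE', 'WS', 'WT', 'UN', 'RT']
--     for suffix in problematic_suffixes:
--         if symbol.endswith(f' {suffix}') or symbol.endswith(f'-{suffix}'):
--             return False
--
--     return True
-- ===== SOURCE B (Python) =====
-- _INDICES = {'VIX', 'DJI', 'IXIC', 'GSPC', 'RUT', 'NDX', 'SPX'}
-- _BAD_TAILS = {'PRB', 'PRA', 'PRC', 'PRD', 'PRE', 'WS', 'WT', 'UN', 'RT'}
--
--
-- def _is_valid_symbol(symbol: str) -> bool:
--     """Check if a symbol is valid and tradeable"""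
--     # One manual left-to-right scan: count the length, reject a space on
--     # sight, stop as soon as the length budget is blown, and remember the
--     # position just past the last '-'.  After the scan only two constant-time
--     # membership tests remain: the whole symbol against the index set and the
--     # recorded tail against the problematic-suffix set.
--     n = 0
--     tail_start = 0
--     for ch in symbol:
--         if ch == ' ':
--             return False
--         n += 1
--         if n > 10:
--             return False
--         if ch == '-':
--             tail_start = n
--     if n == 0 or symbol in _INDICES:
--         return False
--     if tail_start and symbol[tail_start:] in _BAD_TAILS:
--         return False
--     return True
-- ===== Notes on version B (the rewrite author's own statement) =====
-- stated objective: alternative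
-- what changed: A uses staged built-in passes (len, ' ' in, then a loop of endswith over nine suffixes, each rescanning the string); B makes one manual character scan with an accumulator that counts length, rejects spaces, and records the position after the last '-', then finishes with two set-membership tests (index set, recorded tail).
import Mathlib
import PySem

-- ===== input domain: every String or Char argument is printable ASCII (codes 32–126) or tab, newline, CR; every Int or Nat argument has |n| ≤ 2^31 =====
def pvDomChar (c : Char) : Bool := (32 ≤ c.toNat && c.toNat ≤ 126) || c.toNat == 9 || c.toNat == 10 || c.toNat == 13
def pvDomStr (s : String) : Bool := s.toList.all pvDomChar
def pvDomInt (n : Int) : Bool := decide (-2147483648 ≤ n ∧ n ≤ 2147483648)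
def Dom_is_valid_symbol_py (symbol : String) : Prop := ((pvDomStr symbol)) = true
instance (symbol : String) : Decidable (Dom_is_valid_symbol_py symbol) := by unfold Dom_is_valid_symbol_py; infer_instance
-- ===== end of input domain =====

-- B replaces A's staged built-in passes (len, space test, nine endswith checks)
-- by one manual left-to-right scan accumulating length, a space rejection and the
-- position after the last '-', followed by two set-membership tests (objective: alternative).

-- ===== PORT A =====
def pvIndicesA : List String := ["VIX", "DJI", "IXIC", "GSPC", "RUT", "NDX", "SPX"]
def pvSuffixesA : List String := ["PRB", "PRA", "PRC", "PRD", "PRE", "WS", "WT", "UN", "RT"]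

def is_valid_symbol_py (symbol : String) : Bool :=
  -- if not symbol or len(symbol) > 10: return False
  if symbol = "" ∨ 10 < PySem.Str.len symbol then false
  -- if ' ' in symbol: return False
  else if PySem.Str.isIn " " symbol = true then false
  -- if symbol in indices: return False
  else if symbol ∈ pvIndicesA then false
  -- for suffix in problematic_suffixes: if symbol.endswith(f' {suffix}') or symbol.endswith(f'-{suffix}'): return False
  else if pvSuffixesA.any (fun sfx =>
      PySem.Str.endswith symbol (" " ++ sfx) || PySem.Str.endswith symbol ("-" ++ sfx)) = true then false
  else true

-- ===== PORT B =====
def pvIndicesB : List String := ["VIX", "DJI", "IXIC", "GSPC", "RUT", "NDX", "SPX"]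
def pvBadTailsB : List String := ["PRB", "PRA", "PRC", "PRD", "PRE", "WS", "WT", "UN", "RT"]

-- B's for-loop over the characters with the accumulator (n, tail_start);
-- none encodes the early 'return False' from inside the loop.
def pvScanB : List Char → Nat → Nat → Option (Nat × Nat)
  | [], n, t => some (n, t)
  | c :: cs, n, t =>
    if c = ' ' then none
    else if 10 < n + 1 then none
    else pvScanB cs (n + 1) (if c = '-' then n + 1 else t)

def is_valid_symbol_py_alt (symbol : String) : Bool :=
  match pvScanB symbol.toList 0 0 with
  | none => false
  | some (n, t) =>
    -- if n == 0 or symbol in _INDICES: return False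
    if n = 0 ∨ symbol ∈ pvIndicesB then false
    -- if tail_start and symbol[tail_start:] in _BAD_TAILS: return False
    -- (t is a Nat with 0 ≤ t ≤ len(symbol), so the Python slice is exactly 'drop t')
    else if t ≠ 0 ∧ String.ofList (symbol.toList.drop t) ∈ pvBadTailsB then false
    else true

-- ===== PRECONDITION & SPEC =====
def Spec_is_valid_symbol_py (symbol : String) (out : Bool) : Prop := out = is_valid_symbol_py_alt symbol
instance (symbol : String) (out : Bool) : Decidable (Spec_is_valid_symbol_py symbol out) := by unfold Spec_is_valid_symbol_py; infer_instance

-- ===== CLAIM (what is proved, stated in full; the proofs are below) =====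
def Claim_equal_is_valid_symbol_py : Prop := ∀ (symbol : String), Dom_is_valid_symbol_py symbol → Spec_is_valid_symbol_py symbol (is_valid_symbol_py symbol)

-- ===== LEMMAS AND PROOFS =====

-- the characters after the last '-' (the whole string when there is no '-'):
-- proof-side description of both A's matching suffix and B's recorded tail
def pvLastDashTail (symbol : String) : String :=
  String.ofList ((symbol.toList.reverse.takeWhile (fun c => c != '-')).reverse)

-- pure version of B's scan accumulator for the tail position
def pvTailIdx : List Char → Nat → Nat → Nat
  | [], _, t => t
  | c :: cs, n, t => pvTailIdx cs (n + 1) (if c = '-' then n + 1 else t)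

theorem pvTailIdx_no_dash (l : List Char) (hn : '-' ∉ l) : ∀ n t, pvTailIdx l n t = t := by
  induction l with
  | nil => intro n t; rfl
  | cons c cs ih =>
    intro n t
    have hc : c ≠ '-' := fun h => hn (by simp [h])
    have hcs : '-' ∉ cs := fun h => hn (List.mem_cons_of_mem _ h)
    simp [pvTailIdx, hc, ih hcs]

theorem pvTailIdx_append (p q : List Char) :
    ∀ n t, pvTailIdx (p ++ q) n t = pvTailIdx q (n + p.length) (pvTailIdx p n t) := by
  induction p with
  | nil => intro n t; simp [pvTailIdx]
  | cons c cs ih =>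
    intro n t
    simp only [List.cons_append, pvTailIdx, ih, List.length_cons]
    congr 1
    omega

theorem pvScanB_some (l : List Char) :
    ∀ n t, ' ' ∉ l → n + l.length ≤ 10 →
      pvScanB l n t = some (n + l.length, pvTailIdx l n t) := by
  induction l with
  | nil => intro n t _ _; simp [pvScanB, pvTailIdx]
  | cons c cs ih =>
    intro n t hsp hlen
    have hc : ¬ c = ' ' := fun h => hsp (by simp [h])
    have hcs : ' ' ∉ cs := fun h => hsp (List.mem_cons_of_mem _ h)
    have h1 : ¬ 10 < n + 1 := by simp at hlen ⊢; omega
    rw [pvScanB, if_neg hc, if_neg h1, ih (n + 1) _ hcs (by simp at hlen ⊢; omega)]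
    simp only [pvTailIdx, List.length_cons]
    congr 2
    omega

theorem pvScanB_none (l : List Char) :
    ∀ n t, ((10 < n + l.length ∧ n ≤ 10) ∨ ' ' ∈ l) → pvScanB l n t = none := by
  induction l with
  | nil =>
    intro n t h
    rcases h with ⟨h1, h2⟩ | h
    · simp at h1; omega
    · simp at h
  | cons c cs ih =>
    intro n t h
    by_cases hc : c = ' '
    · simp [pvScanB, hc]
    · rw [pvScanB, if_neg hc]
      by_cases h1 : 10 < n + 1
      · simp [h1]
      · rw [if_neg h1]
        apply ih
        rcases h with ⟨ha, _⟩ | hm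
        · left; simp at ha ⊢; omega
        · right; rcases List.mem_cons.mp hm with h | h
          · exact absurd h.symm hc
          · exact h

theorem pv_takeWhile_no_dash (l : List Char) :
    '-' ∉ (l.reverse.takeWhile (fun c => c != '-')).reverse := by
  intro h
  have := List.mem_takeWhile_imp (List.mem_reverse.mp h)
  simp at this

-- a dash-free list s is a '-'-suffix of l iff '-' occurs in l and s is exactly
-- the segment after the last '-'
theorem pv_suffix_dash_iff (l s : List Char) (hs : '-' ∉ s) :
    ('-' :: s) <:+ l ↔ ('-' ∈ l ∧ (l.reverse.takeWhile (fun c => c != '-')).reverse = s) := by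
  constructor
  · rintro ⟨p, rfl⟩
    refine ⟨by simp, ?_⟩
    have hrev : (p ++ '-' :: s).reverse = s.reverse ++ '-' :: p.reverse := by simp
    rw [hrev, List.takeWhile_append_of_pos (by
      intro a ha
      simp only [bne_iff_ne, ne_eq]
      exact fun h => hs (by simpa [h] using List.mem_reverse.mp ha))]
    simp [List.takeWhile]
  · rintro ⟨hm, ht⟩
    have hm' : '-' ∈ l.reverse := List.mem_reverse.mpr hm
    have hne : l.reverse.dropWhile (fun c => c != '-') ≠ [] := by
      intro h
      have := (List.dropWhile_eq_nil_iff).mp h _ hm'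
      simp at this
    have hhead := List.head_dropWhile_not (fun c => c != '-') hne
    obtain ⟨t, hdrop⟩ : ∃ t, l.reverse.dropWhile (fun c => c != '-') = '-' :: t := by
      cases hd : l.reverse.dropWhile (fun c => c != '-') with
      | nil => exact absurd hd hne
      | cons a t =>
        refine ⟨t, ?_⟩
        have : (a != '-') = false := by simpa [hd] using hhead
        simp only [bne_eq_false_iff_eq] at this
        simp [this]
    have htake : l.reverse.takeWhile (fun c => c != '-') = s.reverse := by
      have := congrArg List.reverse ht
      simpa using this
    have hsplit : l.reverse = s.reverse ++ '-' :: t := by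
      conv_lhs => rw [← List.takeWhile_append_dropWhile (p := fun c => c != '-') (l := l.reverse)]
      rw [htake, hdrop]
    have : l = t.reverse ++ '-' :: s := by
      have := congrArg List.reverse hsplit
      simpa using this
    exact ⟨t.reverse, this.symm⟩

-- when '-' occurs, B's recorded tail index is nonzero and cuts exactly the last-dash tail
theorem pvTailIdx_spec (l : List Char) (hm : '-' ∈ l) :
    pvTailIdx l 0 0 ≠ 0 ∧ l.drop (pvTailIdx l 0 0) = (l.reverse.takeWhile (fun c => c != '-')).reverse := by
  set s := (l.reverse.takeWhile (fun c => c != '-')).reverse with hs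
  have hns : '-' ∉ s := pv_takeWhile_no_dash l
  obtain ⟨p, hp⟩ : ('-' :: s) <:+ l := (pv_suffix_dash_iff l s hns).mpr ⟨hm, rfl⟩
  have hidx : pvTailIdx l 0 0 = p.length + 1 := by
    rw [← hp, pvTailIdx_append]
    simp only [pvTailIdx, Nat.zero_add]
    exact pvTailIdx_no_dash s hns _ _
  refine ⟨by rw [hidx]; exact Nat.succ_ne_zero _, ?_⟩
  have hl : l = (p ++ ['-']) ++ s := by rw [← hp]; simp
  rw [hidx, hl, show p.length + 1 = (p ++ ['-']).length by simp, List.drop_left]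

theorem pvTailIdx_zero_iff (l : List Char) : pvTailIdx l 0 0 = 0 ↔ '-' ∉ l := by
  constructor
  · intro h hm
    exact (pvTailIdx_spec l hm).1 h
  · intro h
    exact pvTailIdx_no_dash l h 0 0

theorem pv_space_ends (l cs : List Char) (hsp : ' ' ∉ l) :
    PySem.Chars.endswith l (' ' :: cs) = false := by
  rw [Bool.eq_false_iff]
  intro h
  rcases (PySem.Chars.endswith_iff _ _).mp h with ⟨p, hp⟩
  exact hsp (by rw [← hp]; simp)

theorem pv_dash_ends (l cs : List Char) (hcs : '-' ∉ cs) :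
    (PySem.Chars.endswith l ('-' :: cs) = true)
      ↔ ('-' ∈ l ∧ (l.reverse.takeWhile (fun c => c != '-')).reverse = cs) := by
  rw [PySem.Chars.endswith_iff]
  exact pv_suffix_dash_iff l cs hcs

theorem pv_mk_eq (T : List Char) (t : String) : (String.ofList T = t) ↔ T = t.toList := by
  constructor
  · intro h; simpa using congrArg String.toList h
  · intro h; subst h; simp

-- the heart: under "no space in symbol", A's suffix scan equals the last-dash-tail test
theorem pv_core (symbol : String) (hsp : ¬ PySem.Str.isIn " " symbol = true) :
    (pvSuffixesA.any (fun sfx =>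
        PySem.Str.endswith symbol (" " ++ sfx) || PySem.Str.endswith symbol ("-" ++ sfx)) = true)
      ↔ (PySem.Str.isIn "-" symbol = true ∧ pvLastDashTail symbol ∈ pvBadTailsB) := by
  have hsp' : ' ' ∉ symbol.toList := by
    intro hmem
    exact hsp (by
      simp only [PySem.Str.isIn_eq]
      exact (PySem.Chars.isIn_iff_infix _ _).mpr ((List.singleton_infix_iff _ _).mpr hmem))
  have hdash : (PySem.Str.isIn "-" symbol = true) ↔ '-' ∈ symbol.toList := by
    simp only [PySem.Str.isIn_eq]
    rw [PySem.Chars.isIn_iff_infix]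
    exact List.singleton_infix_iff _ _
  simp only [pvSuffixesA, pvBadTailsB, List.any_cons, List.any_nil, Bool.or_eq_true,
    PySem.Str.endswith_eq,
    show (" " ++ "PRB" : String).toList = ' ' :: ['P','R','B'] from rfl,
    show (" " ++ "PRA" : String).toList = ' ' :: ['P','R','A'] from rfl,
    show (" " ++ "PRC" : String).toList = ' ' :: ['P','R','C'] from rfl,
    show (" " ++ "PRD" : String).toList = ' ' :: ['P','R','D'] from rfl,
    show (" " ++ "PRE" : String).toList = ' ' :: ['P','R','E'] from rfl,
    show (" " ++ "WS" : String).toList = ' ' :: ['W','S'] from rfl,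
    show (" " ++ "WT" : String).toList = ' ' :: ['W','T'] from rfl,
    show (" " ++ "UN" : String).toList = ' ' :: ['U','N'] from rfl,
    show (" " ++ "RT" : String).toList = ' ' :: ['R','T'] from rfl,
    show ("-" ++ "PRB" : String).toList = '-' :: ['P','R','B'] from rfl,
    show ("-" ++ "PRA" : String).toList = '-' :: ['P','R','A'] from rfl,
    show ("-" ++ "PRC" : String).toList = '-' :: ['P','R','C'] from rfl,
    show ("-" ++ "PRD" : String).toList = '-' :: ['P','R','D'] from rfl,
    show ("-" ++ "PRE" : String).toList = '-' :: ['P','R','E'] from rfl,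
    show ("-" ++ "WS" : String).toList = '-' :: ['W','S'] from rfl,
    show ("-" ++ "WT" : String).toList = '-' :: ['W','T'] from rfl,
    show ("-" ++ "UN" : String).toList = '-' :: ['U','N'] from rfl,
    show ("-" ++ "RT" : String).toList = '-' :: ['R','T'] from rfl,
    pv_space_ends symbol.toList _ hsp',
    pv_dash_ends symbol.toList ['P','R','B'] (by decide),
    pv_dash_ends symbol.toList ['P','R','A'] (by decide),
    pv_dash_ends symbol.toList ['P','R','C'] (by decide),
    pv_dash_ends symbol.toList ['P','R','D'] (by decide),
    pv_dash_ends symbol.toList ['P','R','E'] (by decide),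
    pv_dash_ends symbol.toList ['W','S'] (by decide),
    pv_dash_ends symbol.toList ['W','T'] (by decide),
    pv_dash_ends symbol.toList ['U','N'] (by decide),
    pv_dash_ends symbol.toList ['R','T'] (by decide),
    show ("PRB" : String).toList = ['P','R','B'] from rfl,
    show ("PRA" : String).toList = ['P','R','A'] from rfl,
    show ("PRC" : String).toList = ['P','R','C'] from rfl,
    show ("PRD" : String).toList = ['P','R','D'] from rfl,
    show ("PRE" : String).toList = ['P','R','E'] from rfl,
    show ("WS" : String).toList = ['W','S'] from rfl,
    show ("WT" : String).toList = ['W','T'] from rfl,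
    show ("UN" : String).toList = ['U','N'] from rfl,
    show ("RT" : String).toList = ['R','T'] from rfl,
    hdash, List.mem_cons, List.not_mem_nil, or_false,
    pvLastDashTail, pv_mk_eq, Bool.false_eq_true, false_or]
  constructor
  · rintro (⟨h1, h2⟩ | ⟨h1, h2⟩ | ⟨h1, h2⟩ | ⟨h1, h2⟩ | ⟨h1, h2⟩ | ⟨h1, h2⟩ | ⟨h1, h2⟩ | ⟨h1, h2⟩ | ⟨h1, h2⟩) <;>
      exact ⟨h1, by simp [h2]⟩
  · rintro ⟨h1, h | h | h | h | h | h | h | h | h⟩ <;> simp [h1, h]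

-- B's tail test, phrased through the scan's result, equals the last-dash-tail test
theorem pv_tail_test (symbol : String) :
    ((pvTailIdx symbol.toList 0 0 ≠ 0 ∧
        String.ofList (symbol.toList.drop (pvTailIdx symbol.toList 0 0)) ∈ pvBadTailsB)
      ↔ (PySem.Str.isIn "-" symbol = true ∧ pvLastDashTail symbol ∈ pvBadTailsB)) := by
  have hdash : (PySem.Str.isIn "-" symbol = true) ↔ '-' ∈ symbol.toList := by
    simp only [PySem.Str.isIn_eq]
    rw [PySem.Chars.isIn_iff_infix]
    exact List.singleton_infix_iff _ _
  constructor
  · rintro ⟨h1, h2⟩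
    have hm : '-' ∈ symbol.toList := by
      by_contra hnm
      exact h1 ((pvTailIdx_zero_iff _).mpr hnm)
    refine ⟨hdash.mpr hm, ?_⟩
    rw [pvLastDashTail, ← (pvTailIdx_spec symbol.toList hm).2]
    exact h2
  · rintro ⟨h1, h2⟩
    have hm : '-' ∈ symbol.toList := hdash.mp h1
    refine ⟨fun h => (pvTailIdx_zero_iff _).mp h hm, ?_⟩
    rw [pvLastDashTail] at h2
    rw [(pvTailIdx_spec symbol.toList hm).2]
    exact h2

-- ===== VERDICT (by name: the statement is the Claim_ definition above) =====
set_option maxHeartbeats 1000000 in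
theorem is_valid_symbol_py_spec : Claim_equal_is_valid_symbol_py := by
  intro symbol _
  unfold Spec_is_valid_symbol_py
  have hlen : PySem.Str.len symbol = (symbol.toList.length : Int) := PySem.Str.len_eq symbol
  by_cases hsp : PySem.Str.isIn " " symbol = true
  · -- a space: A rejects at its second guard; B's scan early-returns
    have hsp' : ' ' ∈ symbol.toList := by
      simp only [PySem.Str.isIn_eq] at hsp
      exact (List.singleton_infix_iff _ _).mp ((PySem.Chars.isIn_iff_infix _ _).mp hsp)
    have hB : is_valid_symbol_py_alt symbol = false := by
      rw [is_valid_symbol_py_alt, pvScanB_none symbol.toList 0 0 (Or.inr hsp')]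
    rw [hB, is_valid_symbol_py]
    split_ifs <;> simp_all
  · by_cases hlong : 10 < symbol.toList.length
    · -- too long: both reject
      have hB : is_valid_symbol_py_alt symbol = false := by
        rw [is_valid_symbol_py_alt,
          pvScanB_none symbol.toList 0 0 (Or.inl ⟨by omega, by omega⟩)]
      rw [hB, is_valid_symbol_py, if_pos (Or.inr (by rw [hlen]; exact_mod_cast hlong))]
    · -- no space, length fits: B's scan completes with n = length, t = pvTailIdx
      have hsp' : ' ' ∉ symbol.toList := by
        intro hmem
        exact hsp (by
          simp only [PySem.Str.isIn_eq]
          exact (PySem.Chars.isIn_iff_infix _ _).mpr ((List.singleton_infix_iff _ _).mpr hmem))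
      have hscan := pvScanB_some symbol.toList 0 0 hsp' (by omega)
      rw [is_valid_symbol_py_alt, hscan]
      by_cases h0 : symbol.toList.length = 0
      · -- empty symbol: A's first guard, B's n = 0 test
        have he : symbol = "" := by
          have hl : symbol.toList = [] := List.length_eq_zero_iff.mp h0
          simpa using congrArg String.ofList hl
        rw [is_valid_symbol_py, if_pos (Or.inl he)]
        simp [h0]
      · have hne : ¬ symbol = "" := by
          intro h; subst h; simp at h0
        rw [is_valid_symbol_py, if_neg (by
          rintro (h | h)
          · exact hne h
          · rw [hlen] at h; omega), if_neg hsp]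
        simp only [Nat.zero_add]
        by_cases hIx : symbol ∈ pvIndicesA
        · have hIx' : symbol ∈ pvIndicesB := hIx
          rw [if_pos hIx, if_pos (Or.inr hIx')]
        · have hIx' : symbol ∉ pvIndicesB := hIx
          rw [if_neg hIx, if_neg (show ¬ (symbol.toList.length = 0 ∨ symbol ∈ pvIndicesB) from by
            rintro (h | h)
            · exact h0 h
            · exact hIx' h)]
          by_cases hsfx : pvSuffixesA.any (fun sfx =>
              PySem.Str.endswith symbol (" " ++ sfx) || PySem.Str.endswith symbol ("-" ++ sfx)) = true
          · rw [if_pos hsfx, if_pos ((pv_tail_test symbol).mpr ((pv_core symbol hsp).mp hsfx))]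
          · rw [if_neg hsfx,
              if_neg (fun h => hsfx ((pv_core symbol hsp).mpr ((pv_tail_test symbol).mp h)))]
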